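-- pv_equiv track=rewrite | github.com/Sulagna-Dutta-Roy/HackSolutions | Problem Solving Basic/Maximum Laptop Cost.py | maxCost
-- ===== SOURCE A (Python) =====
-- def maxCost(cost, labels, dailyCount):
--     # Write your code here
--     max_cost = 0
--     produce = 0
--     daily_cost = 0
--     for c, l in zip(cost, labels):
--         daily_cost += c
--         if l == 'legal':
--             produce += 1
--
--         if produce == dailyCount:
--             max_cost = max(max_cost, daily_cost)
--             daily_cost = 0
--             produce = 0
--     return max_cost
-- ===== SOURCE B (Python) =====
-- def maxCost(cost, labels, dailyCount):
--     # prefix sums over cost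
--     pre = [0]
--     s = 0
--     for c in cost:
--         s += c
--         pre.append(s)
--     # batch-end boundaries: the position of every dailyCount-th legal label
--     ends = []
--     legal = 0
--     for i, l in enumerate(labels[:len(cost)]):
--         if l == 'legal':
--             legal += 1
--             if dailyCount > 0 and legal % dailyCount == 0:
--                 ends.append(i)
--     # best batch total as a difference of prefix sums
--     best = 0
--     prev = 0
--     for e in ends:
--         best = max(best, pre[e + 1] - prev)
--         prev = pre[e + 1]
--     return best
-- ===== Notes on version B (the rewrite author's own statement) =====
-- stated objective: alternative
-- what changed: Replaced A's single reset-and-accumulate loop by a prefix-sum array plus a batch-boundary index pass: boundaries are the positions of every dailyCount-th legal label, and each batch total is a difference of two prefix sums.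
-- intended difference: When dailyCount == 0, A's produce == dailyCount check fires after every item before the first 'legal' label, so A returns the maximum single cost in that prefix (positive on the D_ inputs); B returns 0 since no batch of zero legal labels can complete, which is the intended value. — e.g. on maxCost([1], ["x"], 0): A returns 1, B returns 0
import Mathlib
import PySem

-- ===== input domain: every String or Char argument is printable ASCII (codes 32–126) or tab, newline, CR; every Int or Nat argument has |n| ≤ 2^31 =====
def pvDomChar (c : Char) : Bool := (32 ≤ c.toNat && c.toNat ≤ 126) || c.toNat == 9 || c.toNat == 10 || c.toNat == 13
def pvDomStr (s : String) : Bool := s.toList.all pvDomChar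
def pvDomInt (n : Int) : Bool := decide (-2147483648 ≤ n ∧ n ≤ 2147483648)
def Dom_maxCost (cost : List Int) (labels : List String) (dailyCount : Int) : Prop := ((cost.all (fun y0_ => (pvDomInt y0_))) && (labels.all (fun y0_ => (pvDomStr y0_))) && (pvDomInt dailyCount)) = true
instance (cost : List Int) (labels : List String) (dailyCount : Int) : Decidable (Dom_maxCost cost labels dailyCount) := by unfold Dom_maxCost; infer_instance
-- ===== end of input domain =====

-- B replaces A's reset-and-accumulate loop by prefix sums plus a batch-boundary index
-- pass; on dailyCount = 0 (D_ below) B intentionally returns 0 where A returns an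
-- accidental prefix maximum. Objective: alternative.

-- ===== PORT A =====
def maxCost (cost : List Int) (labels : List String) (dailyCount : Int) : Int :=
  ((cost.zip labels).foldl
    (fun (st : Int × Int × Int) (cl : Int × String) =>
      let daily_cost := st.2.2 + cl.1
      let produce := if cl.2 = "legal" then st.2.1 + 1 else st.2.1
      if produce = dailyCount then (max st.1 daily_cost, (0 : Int), (0 : Int))
      else (st.1, produce, daily_cost))
    (0, 0, 0)).1

-- ===== PORT B =====
def maxCost_alt (cost : List Int) (labels : List String) (dailyCount : Int) : Int :=
  -- prefix sums over cost (pre, running sum s)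
  let ps := cost.foldl
    (fun (ps : List Int × Int) (c : Int) =>
      let s := ps.2 + c
      (ps.1 ++ [s], s)) ([0], 0)
  let pre := ps.1
  -- batch-end boundaries: the position of every dailyCount-th legal label
  let el := (PySem.List.enumerate (labels.take cost.length) 0).foldl
    (fun (el : List Int × Int) (il : Int × String) =>
      if il.2 = "legal" then
        let legal := el.2 + 1
        if 0 < dailyCount ∧ PySem.Int.mod legal dailyCount = 0 then (el.1 ++ [il.1], legal)
        else (el.1, legal)
      else el) ([], 0)
  -- best batch total as a difference of prefix sums
  let bp := el.1.foldl
    (fun (bp : Int × Int) (e : Int) =>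
      let v := PySem.List.pyGetD pre (e + 1) 0
      (max bp.1 (v - bp.2), v)) (0, 0)
  bp.1

-- ===== PRECONDITION & SPEC =====
-- When dailyCount == 0, A's produce == dailyCount check fires after every item before the
-- first 'legal' label, so A returns the maximum single cost in that prefix (positive on
-- exactly the D_ inputs); B returns 0 since no batch of zero legal labels can complete,
-- which is the intended value.
def D_maxCost (cost : List Int) (labels : List String) (dailyCount : Int) : Prop :=
  dailyCount = 0 ∧
    (((cost.zip labels).takeWhile (fun cl => cl.2 != "legal")).any
      (fun cl => decide (0 < cl.1))) = true
instance (cost : List Int) (labels : List String) (dailyCount : Int) : Decidable (D_maxCost cost labels dailyCount) := by unfold D_maxCost; infer_instance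
def Spec_maxCost (cost : List Int) (labels : List String) (dailyCount : Int) (out : Int) : Prop := ¬ D_maxCost cost labels dailyCount → out = maxCost_alt cost labels dailyCount
instance (cost : List Int) (labels : List String) (dailyCount : Int) (out : Int) : Decidable (Spec_maxCost cost labels dailyCount out) := by unfold Spec_maxCost; infer_instance
def pvDiffWitness_maxCost : List Int × List String × Int := ([1], ["x"], 0)
def pvDiffWitnessOut_maxCost : Int × Int := (1, 0)

-- ===== CLAIM (what is proved, stated in full; the proofs are below) =====
def Claim_unchanged_maxCost : Prop := ∀ (cost : List Int) (labels : List String) (dailyCount : Int), Dom_maxCost cost labels dailyCount → Spec_maxCost cost labels dailyCount (maxCost cost labels dailyCount)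
def Claim_changed_maxCost : Prop := Dom_maxCost (pvDiffWitness_maxCost.1) (pvDiffWitness_maxCost.2.1) (pvDiffWitness_maxCost.2.2) ∧ D_maxCost (pvDiffWitness_maxCost.1) (pvDiffWitness_maxCost.2.1) (pvDiffWitness_maxCost.2.2) ∧ maxCost (pvDiffWitness_maxCost.1) (pvDiffWitness_maxCost.2.1) (pvDiffWitness_maxCost.2.2) = pvDiffWitnessOut_maxCost.1 ∧ maxCost_alt (pvDiffWitness_maxCost.1) (pvDiffWitness_maxCost.2.1) (pvDiffWitness_maxCost.2.2) = pvDiffWitnessOut_maxCost.2 ∧ pvDiffWitnessOut_maxCost.1 ≠ pvDiffWitnessOut_maxCost.2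
def Claim_exact_maxCost : Prop := ∀ (cost : List Int) (labels : List String) (dailyCount : Int), Dom_maxCost cost labels dailyCount → D_maxCost cost labels dailyCount → maxCost cost labels dailyCount ≠ maxCost_alt cost labels dailyCount

-- ===== LEMMAS AND PROOFS =====

-- sum of the first k costs
def pvS (cost : List Int) (k : Nat) : Int := (cost.take k).sum
-- number of "legal" labels among the first k
def pvL (ls : List String) (k : Nat) : Int := ((ls.take k).countP (fun l => l == "legal") : Nat)
-- prefix-sum list [pvS 0, …, pvS n]
def pvPreList (cost : List Int) : List Int := (List.range (cost.length + 1)).map (pvS cost)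
-- boundary positions of the labels ls, started at absolute index s with c legals already seen
def pvEnds (dc : Int) : List String → Int → Int → List Int
  | [], _, _ => []
  | l :: ls, s, c =>
    if l = "legal" then
      (if 0 < dc ∧ PySem.Int.mod (c + 1) dc = 0 then [s] else []) ++ pvEnds dc ls (s + 1) (c + 1)
    else pvEnds dc ls (s + 1) c

lemma pv_preFold (cs : List Int) : ∀ (acc : List Int) (s : Int),
    cs.foldl (fun (ps : List Int × Int) c => let s' := ps.2 + c; (ps.1 ++ [s'], s'))
      (acc, s)
    = (acc ++ (List.range cs.length).map (fun k => s + (cs.take (k + 1)).sum), s + cs.sum) := by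
  induction cs with
  | nil => simp
  | cons c cs ih =>
    intro acc s
    simp only [List.foldl_cons]
    rw [ih]
    simp [List.range_succ_eq_map, List.append_assoc, Function.comp, add_assoc]

lemma pv_endsFold (dc : Int) (ls : List String) : ∀ (s : Int) (acc : List Int) (c : Int),
    (PySem.List.enumerate ls s).foldl
      (fun (el : List Int × Int) (il : Int × String) =>
        if il.2 = "legal" then
          let legal := el.2 + 1
          if 0 < dc ∧ PySem.Int.mod legal dc = 0 then (el.1 ++ [il.1], legal)
          else (el.1, legal)
        else el) (acc, c)
    = (acc ++ pvEnds dc ls s c, c + pvL ls ls.length) := by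
  induction ls with
  | nil => simp [pvEnds, pvL]
  | cons l ls ih =>
    intro s acc c
    rw [PySem.List.enumerate_cons]
    simp only [List.foldl_cons]
    by_cases hl : l = "legal"
    · subst hl
      simp only [if_pos rfl]
      by_cases hb : 0 < dc ∧ PySem.Int.mod (c + 1) dc = 0
      · rw [if_pos hb, ih]
        simp only [pvEnds, if_pos rfl, if_pos hb]
        simp [pvL, List.countP_cons, add_comm, add_assoc]
      · rw [if_neg hb, ih]
        simp only [pvEnds, if_pos rfl, if_neg hb]
        simp [pvL, List.countP_cons, add_comm, add_assoc]
    · rw [if_neg hl, ih]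
      simp only [pvEnds, if_neg hl]
      simp [pvL, hl, List.countP_cons]

lemma pv_hG (cost : List Int) (j : Nat) (hj : j + 1 ≤ cost.length) :
    PySem.List.pyGetD (pvPreList cost) ((j : Int) + 1) 0 = pvS cost (j + 1) := by
  have h1 : ((j : Int) + 1) = ((j + 1 : Nat) : Int) := by push_cast; ring
  rw [h1, PySem.List.pyGetD_natCast]
  have h2 : j + 1 < (pvPreList cost).length := by simp [pvPreList]; omega
  rw [List.getD_eq_getElem _ _ h2]
  simp [pvPreList]

lemma pv_mod_add_one (dc L : Int) (h : 0 < dc) :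
    (L + 1) % dc = if L % dc = dc - 1 then 0 else L % dc + 1 := by
  have h0 : L % dc + dc * (L / dc) = L := Int.emod_add_ediv L dc
  have h1 : L + 1 = (L % dc + 1) + dc * (L / dc) := by omega
  rw [h1, Int.add_mul_emod_self_left]
  have hb1 : 0 ≤ L % dc := Int.emod_nonneg L (by omega)
  have hb2 : L % dc < dc := Int.emod_lt_of_pos L h
  split_ifs with he
  · rw [he, sub_add_cancel, Int.emod_self]
  · exact Int.emod_eq_of_lt (by omega) (by omega)

lemma pv_main (cost : List Int) (labels : List String) (dc : Int) (hpos : 0 < dc) :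
    ∀ (k : Nat) (b p d prev : Int),
      p = PySem.Int.mod (pvL (labels.take cost.length) k) dc →
      d = pvS cost k - prev →
      (((cost.zip labels).drop k).foldl
        (fun (st : Int × Int × Int) (cl : Int × String) =>
          let daily_cost := st.2.2 + cl.1
          let produce := if cl.2 = "legal" then st.2.1 + 1 else st.2.1
          if produce = dc then (max st.1 daily_cost, (0 : Int), (0 : Int))
          else (st.1, produce, daily_cost)) (b, p, d)).1
      = ((pvEnds dc ((labels.take cost.length).drop k) (k : Int)
            (pvL (labels.take cost.length) k)).foldl
          (fun (bp : Int × Int) (e : Int) =>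
            let v := PySem.List.pyGetD (pvPreList cost) (e + 1) 0
            (max bp.1 (v - bp.2), v)) (b, prev)).1 := by
  have term : ∀ (k : Nat), ¬ k < (cost.zip labels).length → ∀ (b p d prev : Int),
      (((cost.zip labels).drop k).foldl
        (fun (st : Int × Int × Int) (cl : Int × String) =>
          let daily_cost := st.2.2 + cl.1
          let produce := if cl.2 = "legal" then st.2.1 + 1 else st.2.1
          if produce = dc then (max st.1 daily_cost, (0 : Int), (0 : Int))
          else (st.1, produce, daily_cost)) (b, p, d)).1
      = ((pvEnds dc ((labels.take cost.length).drop k) (k : Int)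
            (pvL (labels.take cost.length) k)).foldl
          (fun (bp : Int × Int) (e : Int) =>
            let v := PySem.List.pyGetD (pvPreList cost) (e + 1) 0
            (max bp.1 (v - bp.2), v)) (b, prev)).1 := by
    intro k hk b p d prev
    have hlen : (labels.take cost.length).length = (cost.zip labels).length := by
      simp [Nat.min_comm]
    rw [List.drop_eq_nil_of_le (by omega), List.drop_eq_nil_of_le (by omega)]
    simp [pvEnds]
  suffices H : ∀ (m k : Nat), (cost.zip labels).length - k ≤ m → ∀ (b p d prev : Int),
      p = PySem.Int.mod (pvL (labels.take cost.length) k) dc →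
      d = pvS cost k - prev →
      (((cost.zip labels).drop k).foldl
        (fun (st : Int × Int × Int) (cl : Int × String) =>
          let daily_cost := st.2.2 + cl.1
          let produce := if cl.2 = "legal" then st.2.1 + 1 else st.2.1
          if produce = dc then (max st.1 daily_cost, (0 : Int), (0 : Int))
          else (st.1, produce, daily_cost)) (b, p, d)).1
      = ((pvEnds dc ((labels.take cost.length).drop k) (k : Int)
            (pvL (labels.take cost.length) k)).foldl
          (fun (bp : Int × Int) (e : Int) =>
            let v := PySem.List.pyGetD (pvPreList cost) (e + 1) 0
            (max bp.1 (v - bp.2), v)) (b, prev)).1 by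
    intro k b p d prev hp hd
    exact H _ k le_rfl b p d prev hp hd
  intro m
  induction m with
  | zero =>
    intro k hkm b p d prev _ _
    exact term k (by omega) b p d prev
  | succ m ih =>
    intro k hkm b p d prev hp hd
    by_cases hkn : k < (cost.zip labels).length
    case neg => exact term k hkn b p d prev
    have hzl : (cost.zip labels).length = min cost.length labels.length := List.length_zip
    have htl : (labels.take cost.length).length = min cost.length labels.length := by
      simp [Nat.min_comm]
    have hkc : k < cost.length := by omega
    have hkl : k < labels.length := by omega
    have hkl' : k < (labels.take cost.length).length := by omega
    have hzd : (cost.zip labels).drop k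
        = (cost[k], labels[k]) :: (cost.zip labels).drop (k + 1) := by
      rw [List.drop_eq_getElem_cons hkn]; simp
    have hld : (labels.take cost.length).drop k
        = labels[k] :: (labels.take cost.length).drop (k + 1) := by
      rw [List.drop_eq_getElem_cons hkl']
      congr 1
      simp [List.getElem_take]
    have hS : pvS cost (k + 1) = pvS cost k + cost[k] := by
      simpa [pvS] using List.sum_take_succ cost k hkc
    have hL : pvL (labels.take cost.length) (k + 1)
        = pvL (labels.take cost.length) k
          + (if labels[k] = "legal" then 1 else 0) := by
      unfold pvL
      rw [List.take_add_one]
      have : (labels.take cost.length)[k]? = some labels[k] := by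
        rw [List.getElem?_eq_getElem hkl']
        simp [List.getElem_take]
      rw [this]
      simp [List.countP_append, List.countP_cons]
    have hc0 : (0 : Int) ≤ pvL (labels.take cost.length) k := by
      unfold pvL; positivity
    rw [hzd, hld]
    simp only [List.foldl_cons, pvEnds]
    rw [PySem.Int.mod_eq_emod_of_pos hpos] at hp
    have hm0a : 0 ≤ pvL (labels.take cost.length) k % dc :=
      Int.emod_nonneg _ (by omega)
    have hm0b : pvL (labels.take cost.length) k % dc < dc :=
      Int.emod_lt_of_pos _ hpos
    by_cases hl : labels[k] = "legal"
    · simp only [hl, if_true]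
      by_cases hbd : p + 1 = dc
      · have hb2 : 0 < dc ∧ PySem.Int.mod (pvL (labels.take cost.length) k + 1) dc = 0 := by
          refine ⟨hpos, ?_⟩
          rw [PySem.Int.mod_eq_emod_of_pos hpos, pv_mod_add_one dc _ hpos,
            if_pos (by omega)]
        rw [if_pos hbd, if_pos hb2]
        simp only [List.cons_append, List.nil_append, List.foldl_cons]
        rw [pv_hG cost k (by omega)]
        have e1 : ((k : Int) + 1) = ((k + 1 : Nat) : Int) := by push_cast; ring
        have e2 : pvL (labels.take cost.length) k + 1
            = pvL (labels.take cost.length) (k + 1) := by rw [hL, if_pos hl]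
        have e3 : d + cost[k] = pvS cost (k + 1) - prev := by omega
        rw [e1, e2, ← e3]
        exact ih (k + 1) (by omega) (max b (d + cost[k])) 0 0 (pvS cost (k + 1))
          (by rw [← e2]; exact hb2.2.symm)
          (by omega)
      · have hb2 : ¬ (0 < dc ∧ PySem.Int.mod (pvL (labels.take cost.length) k + 1) dc = 0) := by
          rintro ⟨-, h2⟩
          rw [PySem.Int.mod_eq_emod_of_pos hpos, pv_mod_add_one dc _ hpos] at h2
          split_ifs at h2 with he <;> omega
        rw [if_neg hbd, if_neg hb2]
        simp only [List.nil_append]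
        have hp' : p + 1 = PySem.Int.mod (pvL (labels.take cost.length) k + 1) dc := by
          rw [PySem.Int.mod_eq_emod_of_pos hpos, pv_mod_add_one dc _ hpos,
            if_neg (by omega)]
          omega
        have e1 : ((k : Int) + 1) = ((k + 1 : Nat) : Int) := by push_cast; ring
        have e2 : pvL (labels.take cost.length) k + 1
            = pvL (labels.take cost.length) (k + 1) := by rw [hL, if_pos hl]
        rw [e1, e2]
        exact ih (k + 1) (by omega) b (p + 1) (d + cost[k]) prev
          (by rw [← e2]; exact hp')
          (by omega)
    · simp only [hl, if_false]
      have hbd : ¬ (p = dc) := by omega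
      rw [if_neg hbd]
      have e1 : ((k : Int) + 1) = ((k + 1 : Nat) : Int) := by push_cast; ring
      have e2 : pvL (labels.take cost.length) k
          = pvL (labels.take cost.length) (k + 1) := by rw [hL, if_neg hl]; omega
      rw [e1, e2]
      exact ih (k + 1) (by omega) b p (d + cost[k]) prev
        (by rw [← e2, PySem.Int.mod_eq_emod_of_pos hpos]; exact hp)
        (by omega)

-- B returns 0 whenever dailyCount ≤ 0 (no boundary is ever emitted)
lemma pv_elFold_nonpos (dc : Int) (hdc : ¬ 0 < dc) (L : List (Int × String)) :
    ∀ (acc : List Int) (c : Int),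
    (L.foldl
      (fun (el : List Int × Int) (il : Int × String) =>
        if il.2 = "legal" then
          let legal := el.2 + 1
          if 0 < dc ∧ PySem.Int.mod legal dc = 0 then (el.1 ++ [il.1], legal)
          else (el.1, legal)
        else el) (acc, c)).1 = acc := by
  induction L with
  | nil => intro acc c; rfl
  | cons il L ih =>
    intro acc c
    simp only [List.foldl_cons]
    by_cases hl : il.2 = "legal"
    · rw [if_pos hl, if_neg (by intro h; exact hdc h.1)]
      exact ih acc (c + 1)
    · rw [if_neg hl]; exact ih acc c

lemma pv_B_nonpos (cost : List Int) (labels : List String) (dc : Int) (hdc : ¬ 0 < dc) :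
    maxCost_alt cost labels dc = 0 := by
  simp only [maxCost_alt]
  have h := pv_elFold_nonpos dc hdc (PySem.List.enumerate (labels.take cost.length) 0) [] 0
  -- the boundary list is empty, so the final fold is over []
  rcases he : (PySem.List.enumerate (labels.take cost.length) 0).foldl
      (fun (el : List Int × Int) (il : Int × String) =>
        if il.2 = "legal" then
          let legal := el.2 + 1
          if 0 < dc ∧ PySem.Int.mod legal dc = 0 then (el.1 ++ [il.1], legal)
          else (el.1, legal)
        else el) ([], 0) with ⟨e1, e2⟩
  rw [he] at h
  simp only at h
  subst h
  simp

-- A's fold for dc < 0 never matches produce = dc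
lemma pv_A_neg_fold (dc : Int) (hdc : dc < 0) (zs : List (Int × String)) :
    ∀ (b p d : Int), 0 ≤ p →
    (zs.foldl
      (fun (st : Int × Int × Int) (cl : Int × String) =>
        let daily_cost := st.2.2 + cl.1
        let produce := if cl.2 = "legal" then st.2.1 + 1 else st.2.1
        if produce = dc then (max st.1 daily_cost, (0 : Int), (0 : Int))
        else (st.1, produce, daily_cost)) (b, p, d)).1 = b := by
  induction zs with
  | nil => intro b p d _; rfl
  | cons cl zs ih =>
    intro b p d hp
    simp only [List.foldl_cons]
    by_cases hl : cl.2 = "legal"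
    · rw [if_pos hl, if_neg (by omega)]
      exact ih b (p + 1) (d + cl.1) (by omega)
    · rw [if_neg hl, if_neg (by omega)]
      exact ih b p (d + cl.1) hp

-- A's fold for dc = 0, once a legal label has been seen (produce > 0): b never changes
lemma pv_A0_phase2 (zs : List (Int × String)) :
    ∀ (b p d : Int), 0 < p →
    (zs.foldl
      (fun (st : Int × Int × Int) (cl : Int × String) =>
        let daily_cost := st.2.2 + cl.1
        let produce := if cl.2 = "legal" then st.2.1 + 1 else st.2.1
        if produce = (0 : Int) then (max st.1 daily_cost, (0 : Int), (0 : Int))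
        else (st.1, produce, daily_cost)) (b, p, d)).1 = b := by
  induction zs with
  | nil => intro b p d _; rfl
  | cons cl zs ih =>
    intro b p d hp
    simp only [List.foldl_cons]
    by_cases hl : cl.2 = "legal"
    · rw [if_pos hl, if_neg (by omega)]
      exact ih b (p + 1) (d + cl.1) (by omega)
    · rw [if_neg hl, if_neg (by omega)]
      exact ih b p (d + cl.1) hp

-- A for dc = 0: result is the fold of max over the prefix before the first legal label
lemma pv_A0_phase1 (zs : List (Int × String)) :
    ∀ (b : Int),
    (zs.foldl
      (fun (st : Int × Int × Int) (cl : Int × String) =>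
        let daily_cost := st.2.2 + cl.1
        let produce := if cl.2 = "legal" then st.2.1 + 1 else st.2.1
        if produce = (0 : Int) then (max st.1 daily_cost, (0 : Int), (0 : Int))
        else (st.1, produce, daily_cost)) (b, 0, 0)).1
    = (zs.takeWhile (fun cl => cl.2 != "legal")).foldl (fun m cl => max m cl.1) b := by
  induction zs with
  | nil => intro b; rfl
  | cons cl zs ih =>
    intro b
    by_cases hl : cl.2 = "legal"
    · simp only [List.foldl_cons, List.takeWhile_cons, hl, bne_self_eq_false,
        Bool.false_eq_true, if_false, if_true]
      rw [if_neg (by norm_num)]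
      simpa using pv_A0_phase2 zs b 1 (0 + cl.1) (by omega)
    · have hb : (cl.2 != "legal") = true := by simp [hl]
      simp only [List.foldl_cons, List.takeWhile_cons, hl, hb, if_false, if_true,
        if_pos rfl]
      simpa using ih (max b (0 + cl.1))

lemma pv_A_zero (cost : List Int) (labels : List String) :
    maxCost cost labels 0
      = ((cost.zip labels).takeWhile (fun cl => cl.2 != "legal")).foldl
          (fun m cl => max m cl.1) 0 := by
  simp only [maxCost]
  exact pv_A0_phase1 (cost.zip labels) 0

lemma pv_foldmax_nonpos (P : List (Int × String)) (h : ∀ x ∈ P, x.1 ≤ 0) :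
    P.foldl (fun m cl => max m cl.1) 0 = 0 := by
  induction P with
  | nil => rfl
  | cons x P ih =>
    simp only [List.foldl_cons]
    have hx : x.1 ≤ 0 := h x (by simp)
    have : max (0 : Int) x.1 = 0 := by omega
    rw [this]
    exact ih (fun y hy => h y (by simp [hy]))

lemma pv_foldmax_ge_init (P : List (Int × String)) : ∀ (b : Int),
    b ≤ P.foldl (fun m cl => max m cl.1) b := by
  induction P with
  | nil => intro b; simp
  | cons x P ih =>
    intro b
    simp only [List.foldl_cons]
    exact le_trans (le_max_left b x.1) (ih (max b x.1))

lemma pv_foldmax_ge_mem (P : List (Int × String)) : ∀ (b : Int) (x : Int × String), x ∈ P →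
    x.1 ≤ P.foldl (fun m cl => max m cl.1) b := by
  induction P with
  | nil => intro b x hx; simp at hx
  | cons y P ih =>
    intro b x hx
    simp only [List.foldl_cons]
    rcases List.mem_cons.mp hx with h | h
    · subst h
      exact le_trans (le_max_right b x.1) (pv_foldmax_ge_init P _)
    · exact ih (max b y.1) x h

theorem maxCost_eq_alt_pos (cost : List Int) (labels : List String) (dailyCount : Int)
    (hpos : 0 < dailyCount) :
    maxCost cost labels dailyCount = maxCost_alt cost labels dailyCount := by
  have hL0 : pvL (labels.take cost.length) 0 = 0 := by simp [pvL]
  have hp0 : (0 : Int) = PySem.Int.mod (pvL (labels.take cost.length) 0) dailyCount := by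
    rw [hL0, PySem.Int.mod_eq_emod_of_pos hpos, Int.zero_emod]
  have hmain := pv_main cost labels dailyCount hpos 0 0 0 0 0 hp0 (by simp [pvS])
  simp only [List.drop_zero, Nat.cast_zero, hL0] at hmain
  have hpre : ([0] ++ (List.range cost.length).map (fun k => 0 + (cost.take (k + 1)).sum)
      : List Int) = pvPreList cost := by
    rw [pvPreList, List.range_succ_eq_map]
    simp [pvS, Function.comp_def]
  simp only [maxCost, maxCost_alt]
  rw [pv_preFold cost [0] 0]
  simp only [hpre]
  rw [pv_endsFold dailyCount (labels.take cost.length) 0 [] 0]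
  simp only [List.nil_append]
  exact hmain

-- ===== VERDICT (by name: the statements are the Claim_ definitions above) =====
theorem maxCost_spec : Claim_unchanged_maxCost := by
  intro cost labels dailyCount _ hD
  rcases lt_trichotomy dailyCount 0 with hneg | hzero | hpos
  · rw [pv_B_nonpos cost labels dailyCount (by omega)]
    exact pv_A_neg_fold dailyCount hneg (cost.zip labels) 0 0 0 le_rfl
  · subst hzero
    rw [pv_B_nonpos cost labels 0 (by omega), pv_A_zero]
    apply pv_foldmax_nonpos
    intro x hx
    by_contra hpx
    exact hD ⟨rfl, List.any_eq_true.mpr ⟨x, hx, by simp; omega⟩⟩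
  · exact maxCost_eq_alt_pos cost labels dailyCount hpos

theorem maxCost_changed : Claim_changed_maxCost := by
  unfold Claim_changed_maxCost; decide

theorem maxCost_tight : Claim_exact_maxCost := by
  intro cost labels dailyCount _ hD
  rcases hD with ⟨hdc, hany⟩
  subst hdc
  rcases List.any_eq_true.mp hany with ⟨x, hx, hxp⟩
  have hxp' : 0 < x.1 := by simpa using hxp
  rw [pv_B_nonpos cost labels 0 (by omega), pv_A_zero]
  have := pv_foldmax_ge_mem ((cost.zip labels).takeWhile (fun cl => cl.2 != "legal")) 0 x hx
  omega
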